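-- pv_equiv track=rewrite | github.com/open-world-collective/enderterm | enderterm/terrain.py | _count_environment_block_hits
-- ===== SOURCE A (Python) =====
-- from typing import Iterable
--
-- _ENV_INFERENCE_IGNORE_BLOCKS = frozenset(
--     {
--         "minecraft:air",
--         "minecraft:structure_void",
--         "minecraft:jigsaw",
--         "minecraft:barrier",
--     }
-- )
--
-- _ENV_INFERENCE_BLOCK_NAMES = ("desert", "snowy_hills", "nether", "end")
--
-- def _base_block_id(block_state_id: str) -> str:
--     return str(block_state_id).split("[", 1)[0]
--
-- def _normalized_block_name(block_state_id: str) -> str: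
--     name = _base_block_id(block_state_id).lower()
--     if name.startswith("minecraft:"):
--         return name[len("minecraft:") :]
--     return name
--
-- def _count_environment_block_hits(block_ids: Iterable[str] | None) -> tuple[int, dict[str, int]]:
--     hits: dict[str, int] = {env: 0 for env in _ENV_INFERENCE_BLOCK_NAMES}
--     total = 0
--     if block_ids is None:
--         return (0, hits)
--
--     for block_state_id in block_ids:
--         block_base = _base_block_id(block_state_id)
--         if not block_base or block_base in _ENV_INFERENCE_IGNORE_BLOCKS:
--             continue
--         total += 1
--         block_name = _normalized_block_name(block_base)
--
--         # Nether-ish.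
--         if (
--             "nether" in block_name
--             or "netherrack" in block_name
--             or "blackstone" in block_name
--             or "basalt" in block_name
--             or "soul_sand" in block_name
--             or "soul_soil" in block_name
--             or "crimson" in block_name
--             or "warped" in block_name
--         ):
--             hits["nether"] += 1
--
--         # End-ish.
--         if block_name.startswith("end_") or "purpur" in block_name or "chorus" in block_name:
--             hits["end"] += 1
--
--         # Desert-ish.
--         if (
--             block_name == "cactus"
--             or block_name == "dead_bush"
--             or block_name.endswith("_sand")
--             or "sandstone" in block_name
--             or "terracotta" in block_name
--         ):
--             hits["desert"] += 1
--
--         # Snow/ice.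
--         if "snow" in block_name or "ice" in block_name:
--             hits["snowy_hills"] += 1
--
--     return (int(total), hits)
-- ===== SOURCE B (Python) =====
-- from typing import Iterable
--
-- _ENV_INFERENCE_IGNORE_BLOCKS = frozenset(
--     {
--         "minecraft:air",
--         "minecraft:structure_void",
--         "minecraft:jigsaw",
--         "minecraft:barrier",
--     }
-- )
--
--
-- def _base_block_id(block_state_id: str) -> str:
--     return str(block_state_id).split("[", 1)[0]
--
--
-- def _normalized_block_name(block_state_id: str) -> str:
--     name = _base_block_id(block_state_id).lower()
--     if name.startswith("minecraft:"):
--         return name[len("minecraft:") :]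
--     return name
--
--
-- _CATEGORY_PREDICATES = (
--     (
--         "desert",
--         lambda n: n == "cactus"
--         or n == "dead_bush"
--         or n.endswith("_sand")
--         or "sandstone" in n
--         or "terracotta" in n,
--     ),
--     ("snowy_hills", lambda n: "snow" in n or "ice" in n),
--     (
--         "nether",
--         lambda n: any(
--             k in n
--             for k in (
--                 "nether",
--                 "blackstone",
--                 "basalt",
--                 "soul_sand",
--                 "soul_soil",
--                 "crimson",
--                 "warped",
--             )
--         ),
--     ),
--     ("end", lambda n: n.startswith("end_") or "purpur" in n or "chorus" in n),
-- )
--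
--
-- def _count_environment_block_hits(block_ids):
--     names = []
--     for block_state_id in block_ids or ():
--         base = _base_block_id(block_state_id)
--         if base and base not in _ENV_INFERENCE_IGNORE_BLOCKS:
--             names.append(_normalized_block_name(base))
--     hits = {cat: sum(1 for n in names if pred(n)) for cat, pred in _CATEGORY_PREDICATES}
--     return (len(names), hits)
-- ===== Notes on version B (the rewrite author's own statement) =====
-- stated objective: simpler
-- what changed: Replaces the single pass that mutates four dict counters in-line with a first pass collecting the normalized names of counted blocks and a category->predicate table from which the hits dict is built by counting matches per category (the redundant 'netherrack' test subsumed by 'nether' is dropped).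
import Mathlib
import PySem

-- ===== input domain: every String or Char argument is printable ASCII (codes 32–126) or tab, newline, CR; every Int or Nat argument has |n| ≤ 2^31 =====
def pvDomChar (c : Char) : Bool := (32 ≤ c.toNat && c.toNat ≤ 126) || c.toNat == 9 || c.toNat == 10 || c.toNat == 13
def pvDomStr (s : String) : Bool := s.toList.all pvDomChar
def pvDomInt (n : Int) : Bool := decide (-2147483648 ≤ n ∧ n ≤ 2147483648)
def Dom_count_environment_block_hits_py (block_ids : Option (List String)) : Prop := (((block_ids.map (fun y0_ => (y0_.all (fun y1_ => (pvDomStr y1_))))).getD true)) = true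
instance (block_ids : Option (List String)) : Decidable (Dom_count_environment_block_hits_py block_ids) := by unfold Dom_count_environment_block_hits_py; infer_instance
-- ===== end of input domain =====

-- B replaces A's single mutating pass over four dict counters by collecting the
-- normalized names once and building the hits dict from a category→predicate table
-- (simpler decomposition; same return value, no side effects).

-- ===== PORT A =====
def pvIgnore : List String :=
  ["minecraft:air", "minecraft:structure_void", "minecraft:jigsaw", "minecraft:barrier"]

-- _base_block_id: str(x).split("[", 1)[0]
def pvBase (s : String) : String :=
  (((PySem.Str.splitMax? s "[" 1).getD []).headD "")

-- _normalized_block_name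
def pvNorm (s : String) : String :=
  let name := PySem.Str.lower (pvBase s)
  if PySem.Str.startswith name "minecraft:" then PySem.Str.slice name (some 10) none else name

-- the body of A's for-loop over (total, hits)
def pvStepA (st : Int × PySem.Dict String Int) (block_state_id : String) :
    Int × PySem.Dict String Int :=
  let block_base := pvBase block_state_id
  if block_base == "" || pvIgnore.contains block_base then st
  else
    let total := st.1 + 1
    let block_name := pvNorm block_base
    let hits := st.2
    let hits := if PySem.Str.isIn "nether" block_name || PySem.Str.isIn "netherrack" block_name ||
        PySem.Str.isIn "blackstone" block_name || PySem.Str.isIn "basalt" block_name ||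
        PySem.Str.isIn "soul_sand" block_name || PySem.Str.isIn "soul_soil" block_name ||
        PySem.Str.isIn "crimson" block_name || PySem.Str.isIn "warped" block_name then
        hits.modify "nether" 0 (· + 1) else hits
    let hits := if PySem.Str.startswith block_name "end_" || PySem.Str.isIn "purpur" block_name ||
        PySem.Str.isIn "chorus" block_name then hits.modify "end" 0 (· + 1) else hits
    let hits := if block_name == "cactus" || block_name == "dead_bush" ||
        PySem.Str.endswith block_name "_sand" || PySem.Str.isIn "sandstone" block_name ||
        PySem.Str.isIn "terracotta" block_name then hits.modify "desert" 0 (· + 1) else hits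
    let hits := if PySem.Str.isIn "snow" block_name || PySem.Str.isIn "ice" block_name then
        hits.modify "snowy_hills" 0 (· + 1) else hits
    (total, hits)

def count_environment_block_hits_py (block_ids : Option (List String)) : Int × (List (String × Int)) :=
  let hits0 : PySem.Dict String Int :=
    (((PySem.Dict.empty.insert "desert" 0).insert "snowy_hills" 0).insert "nether" 0).insert "end" 0
  match block_ids with
  | none => (0, hits0.items)
  | some l =>
    let st := l.foldl pvStepA ((0 : Int), hits0)
    (st.1, st.2.items)

-- ===== PORT B =====
def pvPredDesert (n : String) : Bool :=
  n == "cactus" || n == "dead_bush" || PySem.Str.endswith n "_sand" ||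
  PySem.Str.isIn "sandstone" n || PySem.Str.isIn "terracotta" n

def pvPredSnow (n : String) : Bool := PySem.Str.isIn "snow" n || PySem.Str.isIn "ice" n

def pvPredNether (n : String) : Bool :=
  ["nether", "blackstone", "basalt", "soul_sand", "soul_soil", "crimson", "warped"].any
    (fun k => PySem.Str.isIn k n)

def pvPredEnd (n : String) : Bool :=
  PySem.Str.startswith n "end_" || PySem.Str.isIn "purpur" n || PySem.Str.isIn "chorus" n

def pvTable : List (String × (String → Bool)) :=
  [("desert", pvPredDesert), ("snowy_hills", pvPredSnow), ("nether", pvPredNether), ("end", pvPredEnd)]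

def count_environment_block_hits_py_alt (block_ids : Option (List String)) : Int × (List (String × Int)) :=
  let names := (block_ids.getD []).foldl (fun acc block_state_id =>
      let base := pvBase block_state_id
      if !(base == "") && !(pvIgnore.contains base) then acc ++ [pvNorm base] else acc) []
  (PySem.List.len names, pvTable.map (fun cp => (cp.1, (names.countP cp.2 : Int))))

-- ===== PRECONDITION & SPEC =====
def Spec_count_environment_block_hits_py (block_ids : Option (List String)) (out : Int × (List (String × Int))) : Prop := out = count_environment_block_hits_py_alt block_ids
instance (block_ids : Option (List String)) (out : Int × (List (String × Int))) : Decidable (Spec_count_environment_block_hits_py block_ids out) := by unfold Spec_count_environment_block_hits_py; infer_instance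

-- ===== CLAIM (what is proved, stated in full; the proofs are below) =====
def Claim_equal_count_environment_block_hits_py : Prop := ∀ (block_ids : Option (List String)), Dom_count_environment_block_hits_py block_ids → Spec_count_environment_block_hits_py block_ids (count_environment_block_hits_py block_ids)

-- ===== LEMMAS AND PROOFS =====

-- proof-side helpers
def pvKeep (b : String) : Bool := !(pvBase b == "") && !(pvIgnore.contains (pvBase b))

def pvNames (l : List String) : List String := (l.filter pvKeep).map (fun b => pvNorm (pvBase b))

def pvDict4 (a b c e : Int) : PySem.Dict String Int :=
  ⟨[("desert", a), ("snowy_hills", b), ("nether", c), ("end", e)]⟩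

lemma pvMod_desert (a b c e : Int) (f : Int → Int) :
    (pvDict4 a b c e).modify "desert" 0 f = pvDict4 (f a) b c e := by rfl

lemma pvMod_snow (a b c e : Int) (f : Int → Int) :
    (pvDict4 a b c e).modify "snowy_hills" 0 f = pvDict4 a (f b) c e := by rfl

lemma pvMod_nether (a b c e : Int) (f : Int → Int) :
    (pvDict4 a b c e).modify "nether" 0 f = pvDict4 a b (f c) e := by rfl

lemma pvMod_end (a b c e : Int) (f : Int → Int) :
    (pvDict4 a b c e).modify "end" 0 f = pvDict4 a b c (f e) := by rfl

lemma pvNetherrack_sub (n : String) (h : PySem.Str.isIn "netherrack" n = true) :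
    PySem.Str.isIn "nether" n = true := by
  rw [PySem.Str.isIn_iff_infix] at h ⊢
  exact (List.IsPrefix.isInfix (by decide)).trans h

-- A's nether test equals B's (the "netherrack" disjunct is subsumed by "nether")
lemma pvNether_eq (n : String) :
    (PySem.Str.isIn "nether" n || PySem.Str.isIn "netherrack" n ||
     PySem.Str.isIn "blackstone" n || PySem.Str.isIn "basalt" n ||
     PySem.Str.isIn "soul_sand" n || PySem.Str.isIn "soul_soil" n ||
     PySem.Str.isIn "crimson" n || PySem.Str.isIn "warped" n) = pvPredNether n := by
  simp only [pvPredNether, List.any_cons, List.any_nil, Bool.or_false]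
  cases h : PySem.Str.isIn "nether" n with
  | true => simp
  | false =>
    have hr : PySem.Str.isIn "netherrack" n = false := by
      cases hr : PySem.Str.isIn "netherrack" n
      · rfl
      · rw [pvNetherrack_sub n hr] at h; cases h
    rw [hr]; simp [Bool.or_assoc]

lemma pvStepA_keep (st : Int × PySem.Dict String Int) (x : String) (h : pvKeep x = true)
    (a b c e : Int) (hst : st = (st.1, pvDict4 a b c e)) :
    pvStepA st x =
      (st.1 + 1,
       pvDict4 (a + if pvPredDesert (pvNorm (pvBase x)) then 1 else 0)
               (b + if pvPredSnow (pvNorm (pvBase x)) then 1 else 0)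
               (c + if pvPredNether (pvNorm (pvBase x)) then 1 else 0)
               (e + if pvPredEnd (pvNorm (pvBase x)) then 1 else 0)) := by
  unfold pvKeep at h
  simp only [Bool.and_eq_true, Bool.not_eq_true'] at h
  rw [hst]
  unfold pvStepA
  simp only [h.1, h.2, Bool.or_self]
  rw [pvNether_eq]
  set n := pvNorm (pvBase x)
  cases hN : pvPredNether n <;> cases hE : pvPredEnd n <;>
    cases hD : pvPredDesert n <;> cases hS : pvPredSnow n <;>
    simp [pvPredEnd, pvPredDesert, pvPredSnow, Bool.or_assoc] at hE hD hS ⊢ <;>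
    simp [hN, hE, hD, hS, pvMod_desert, pvMod_snow, pvMod_nether, pvMod_end]

lemma pvStepA_skip (st : Int × PySem.Dict String Int) (x : String) (h : pvKeep x = false) :
    pvStepA st x = st := by
  have hc : (pvBase x == "" || pvIgnore.contains (pvBase x)) = true := by
    unfold pvKeep at h
    cases h1 : (pvBase x == "") <;> cases h2 : pvIgnore.contains (pvBase x) <;> simp_all
  unfold pvStepA
  simp only [hc, reduceIte]

lemma pvLoopA (l : List String) (t a b c e : Int) :
    l.foldl pvStepA (t, pvDict4 a b c e) =
      (t + ((l.filter pvKeep).length : Int),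
       pvDict4 (a + ((pvNames l).countP pvPredDesert : Int))
               (b + ((pvNames l).countP pvPredSnow : Int))
               (c + ((pvNames l).countP pvPredNether : Int))
               (e + ((pvNames l).countP pvPredEnd : Int))) := by
  induction l generalizing t a b c e with
  | nil => simp [pvNames]
  | cons x xs ih =>
    cases hk : pvKeep x with
    | false =>
      have hnames : pvNames (x :: xs) = pvNames xs := by
        simp [pvNames, List.filter_cons, hk]
      rw [List.foldl_cons, pvStepA_skip _ _ hk, ih, hnames]
      simp [List.filter_cons, hk]
    | true =>
      have hnames : pvNames (x :: xs) = pvNorm (pvBase x) :: pvNames xs := by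
        simp [pvNames, List.filter_cons, hk]
      rw [List.foldl_cons, pvStepA_keep _ _ hk a b c e rfl, ih, hnames]
      simp only [List.filter_cons, hk, if_true, List.length_cons, List.countP_cons]
      refine Prod.ext ?_ ?_
      · push_cast; ring
      · show pvDict4 _ _ _ _ = pvDict4 _ _ _ _
        unfold pvDict4
        cases pvPredDesert (pvNorm (pvBase x)) <;> cases pvPredSnow (pvNorm (pvBase x)) <;>
          cases pvPredNether (pvNorm (pvBase x)) <;> cases pvPredEnd (pvNorm (pvBase x)) <;>
          simp <;> push_cast <;> ring_nf <;> simp_all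

lemma pvLoopB (l : List String) (acc : List String) :
    l.foldl (fun acc block_state_id =>
      let base := pvBase block_state_id
      if !(base == "") && !(pvIgnore.contains base) then acc ++ [pvNorm base] else acc) acc
    = acc ++ pvNames l := by
  rw [show (fun (acc : List String) (block_state_id : String) =>
      let base := pvBase block_state_id
      if !(base == "") && !(pvIgnore.contains base) then acc ++ [pvNorm base] else acc)
    = (fun acc x => if pvKeep x then acc ++ [pvNorm (pvBase x)] else acc) from
      funext fun _ => funext fun _ => rfl]
  rw [PySem.List.foldl_append_if pvKeep (fun x => pvNorm (pvBase x))]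
  rfl

-- ===== VERDICT (by name: the statement is the Claim_ definition above) =====
theorem count_environment_block_hits_py_spec : Claim_equal_count_environment_block_hits_py := by
  intro block_ids _
  unfold Spec_count_environment_block_hits_py
  unfold count_environment_block_hits_py count_environment_block_hits_py_alt
  cases block_ids with
  | none => rfl
  | some l =>
    simp only [Option.getD_some]
    rw [pvLoopB l []]
    have h0 : (((PySem.Dict.empty.insert "desert" (0:Int)).insert "snowy_hills" 0).insert "nether" 0).insert "end" 0 = pvDict4 0 0 0 0 := by rfl
    rw [h0, pvLoopA l 0 0 0 0]
    simp [pvDict4, pvTable, PySem.List.len_eq, pvNames]
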